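-- pv_equiv track=rewrite | github.com/dullfig/relay | relaydsl/opt/diode_opt.py | is_monotone_negative
-- ===== SOURCE A (Python) =====
-- def is_monotone_negative(truth_table: dict[tuple[int, ...], int],
--                           var_index: int) -> bool:
--     """
--     Check if a function is monotone decreasing in a variable.
--     f(x=0) >= f(x=1) for all other variable assignments.
--     """
--     n = len(next(iter(truth_table.keys())))
--     for bits, val in truth_table.items():
--         if bits[var_index] == 0:
--             bits_1 = list(bits)
--             bits_1[var_index] = 1
--             val_1 = truth_table.get(tuple(bits_1), 0)
--             if val < val_1:
--                 return False
--     return True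
-- ===== SOURCE B (Python) =====
-- def is_monotone_negative(truth_table: dict[tuple[int, ...], int],
--                           var_index: int) -> bool:
--     """
--     Check if a function is monotone decreasing in a variable, by grouping
--     the table on the remaining variables and comparing the var=0 entry of
--     each group against its var=1 entry (0 when absent).
--     """
--     zeros = []
--     ones = {}
--     for bits, val in truth_table.items():
--         b = bits[var_index]
--         idx = var_index if var_index >= 0 else len(bits) + var_index
--         red = bits[:idx] + bits[idx + 1:]
--         if b == 0:
--             zeros.append((red, val))
--         elif b == 1:
--             ones[red] = val
--     return all(val >= ones.get(red, 0) for red, val in zeros)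
-- ===== Notes on version B (the rewrite author's own statement) =====
-- stated objective: alternative
-- what changed: Replaces A's lookup-driven single scan (build each key's var=1 neighbour tuple and probe the table for it) by a grouping pass that indexes every var=1 value under its reduced key (bits with var_index dropped) and a second pass comparing each var=0 entry against that index.
-- outside the precondition, e.g. on is_monotone_negative({(0, 0): 0, (0, 1): 1, (7,): 5}, 1): A returns False, B raises IndexError
import Mathlib
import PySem

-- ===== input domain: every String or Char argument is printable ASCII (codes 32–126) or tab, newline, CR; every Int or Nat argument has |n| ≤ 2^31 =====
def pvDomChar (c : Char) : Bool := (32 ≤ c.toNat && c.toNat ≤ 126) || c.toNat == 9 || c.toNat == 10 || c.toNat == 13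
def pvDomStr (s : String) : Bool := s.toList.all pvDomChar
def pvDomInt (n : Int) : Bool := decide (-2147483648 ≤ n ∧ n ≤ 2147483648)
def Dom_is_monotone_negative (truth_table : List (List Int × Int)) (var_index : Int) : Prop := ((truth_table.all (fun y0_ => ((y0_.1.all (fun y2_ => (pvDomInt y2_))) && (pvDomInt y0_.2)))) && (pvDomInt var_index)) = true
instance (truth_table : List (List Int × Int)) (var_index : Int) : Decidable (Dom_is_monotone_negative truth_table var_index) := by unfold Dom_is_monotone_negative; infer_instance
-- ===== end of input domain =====

-- B replaces A's lookup-driven scan by a grouping pass (index var=1 values under the reduced key,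
-- then check var=0 entries against the index): an alternative decomposition of the same cost.


-- ===== PORT A =====
-- the loop 'for bits, val in truth_table.items(): …' with its early 'return False'
def is_monotone_negative_go (full : List (List Int × Int)) (var_index : Int) : List (List Int × Int) → Bool
  | [] => true                                   -- loop ends: return True
  | (bits, val) :: rest =>
    match PySem.List.pyGet? bits var_index with  -- bits[var_index]
    | none => true                               -- IndexError (excluded by Pre_)
    | some b =>
      if b == 0 then
        -- bits_1 = list(bits); bits_1[var_index] = 1
        let bits_1 := PySem.List.pySetD bits var_index 1
        -- val_1 = truth_table.get(tuple(bits_1), 0)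
        let val_1 := (PySem.Dict.mk full).getD bits_1 0
        if val < val_1 then false
        else is_monotone_negative_go full var_index rest
      else is_monotone_negative_go full var_index rest

-- 'n = len(next(iter(truth_table.keys())))' is computed but never used; on an empty table it
-- raises StopIteration, which Pre_ excludes (see Raises_).
def is_monotone_negative (truth_table : List (List Int × Int)) (var_index : Int) : Bool :=
  is_monotone_negative_go truth_table var_index truth_table

-- ===== PORT B =====
-- one iteration of B's grouping loop, over the state (zeros, ones)
def is_monotone_negative_alt_step (var_index : Int)
    (acc : List (List Int × Int) × PySem.Dict (List Int) Int) (p : List Int × Int) :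
    List (List Int × Int) × PySem.Dict (List Int) Int :=
  match PySem.List.pyGet? p.1 var_index with     -- b = bits[var_index]
  | none => acc                                  -- IndexError (excluded by Pre_)
  | some b =>
    let idx : Int := if 0 ≤ var_index then var_index else (p.1.length : Int) + var_index
    let red := PySem.List.slice p.1 none (some idx) ++ PySem.List.slice p.1 (some (idx + 1)) none
    if b == 0 then (acc.1 ++ [(red, p.2)], acc.2)
    else if b == 1 then (acc.1, acc.2.insert red p.2)
    else acc

def is_monotone_negative_alt (truth_table : List (List Int × Int)) (var_index : Int) : Bool :=
  let st := truth_table.foldl (is_monotone_negative_alt_step var_index) ([], PySem.Dict.empty)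
  -- all(val >= ones.get(red, 0) for red, val in zeros)
  st.1.all (fun rv => decide (st.2.getD rv.1 0 ≤ rv.2))

-- ===== PRECONDITION & SPEC =====
-- Pre_ excludes: the empty table (A raises StopIteration); any var_index that is out of range
-- for some key (A raises IndexError when its loop reaches that key — it can return False first,
-- see the cite in claim.json, but B's grouping pass then raises the IndexError itself); and
-- duplicate keys, which a Python dict argument can never contain.  On the empty table B
-- returns True where A raises.
def Pre_is_monotone_negative (truth_table : List (List Int × Int)) (var_index : Int) : Prop :=
  truth_table ≠ [] ∧ (truth_table.map Prod.fst).Nodup ∧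
    ∀ p ∈ truth_table, -(p.1.length : Int) ≤ var_index ∧ var_index < (p.1.length : Int)
instance (truth_table : List (List Int × Int)) (var_index : Int) : Decidable (Pre_is_monotone_negative truth_table var_index) := by unfold Pre_is_monotone_negative; infer_instance
def pvWitness_is_monotone_negative : (List (List Int × Int)) × Int := ([([0, 1], 3), ([1, 1], 1)], 0)

def Spec_is_monotone_negative (truth_table : List (List Int × Int)) (var_index : Int) (out : Bool) : Prop := out = is_monotone_negative_alt truth_table var_index
instance (truth_table : List (List Int × Int)) (var_index : Int) (out : Bool) : Decidable (Spec_is_monotone_negative truth_table var_index out) := by unfold Spec_is_monotone_negative; infer_instance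

-- ===== CLAIM (what is proved, stated in full; the proofs are below) =====
def Claim_equal_is_monotone_negative : Prop := ∀ (truth_table : List (List Int × Int)) (var_index : Int), Dom_is_monotone_negative truth_table var_index → Pre_is_monotone_negative truth_table var_index → Spec_is_monotone_negative truth_table var_index (is_monotone_negative truth_table var_index)

-- ===== LEMMAS AND PROOFS =====

-- the Python index var_index resolved to a Nat position in a list of length `x.length`
def pvN (v : Int) (x : List Int) : Nat := (if 0 ≤ v then v else (x.length : Int) + v).toNat
def pvValid (v : Int) (x : List Int) : Prop := -(x.length : Int) ≤ v ∧ v < (x.length : Int)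
def pvRed (v : Int) (x : List Int) : List Int := x.take (pvN v x) ++ x.drop (pvN v x + 1)
def pvIs0 (v : Int) (p : List Int × Int) : Bool := PySem.List.pyGet? p.1 v == some 0
def pvIs1 (v : Int) (p : List Int × Int) : Bool := PySem.List.pyGet? p.1 v == some 1
def pvKV (v : Int) (p : List Int × Int) : List Int × Int := (pvRed v p.1, p.2)

theorem pvN_lt {v : Int} {x : List Int} (h : pvValid v x) : pvN v x < x.length := by
  unfold pvValid at h; unfold pvN; split <;> omega

theorem pvN_length_eq {v : Int} {x y : List Int} (h : x.length = y.length) : pvN v x = pvN v y := by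
  unfold pvN; rw [h]

theorem pyGet?_pvN {v : Int} {x : List Int} (h : pvValid v x) :
    PySem.List.pyGet? x v = x[pvN v x]? := by
  unfold pvValid at h
  simp only [PySem.List.pyGet?, PySem.List.pyIdx?, pvN]
  split_ifs with h1 h2 h3
  · simp
  · omega
  · simp only [Option.bind_some]; congr 1; omega
  · omega

theorem pyGet?_pvN_some {v : Int} {x : List Int} (h : pvValid v x) :
    PySem.List.pyGet? x v = some (x[pvN v x]'(pvN_lt h)) := by
  rw [pyGet?_pvN h, List.getElem?_eq_getElem (pvN_lt h)]

theorem pySetD_pvN {v : Int} {x : List Int} (h : pvValid v x) :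
    PySem.List.pySetD x v 1 = x.set (pvN v x) 1 := by
  unfold pvValid at h
  simp only [PySem.List.pySetD, PySem.List.pySet?, PySem.List.pyIdx?, pvN]
  split_ifs with h1 h2 h3
  · simp
  · omega
  · simp only [Option.map_some, Option.getD_some]; congr 1; omega
  · omega

theorem slice_pvRed {v : Int} {x : List Int} (h : pvValid v x) :
    PySem.List.slice x none (some (if 0 ≤ v then v else (x.length : Int) + v)) ++
      PySem.List.slice x (some ((if 0 ≤ v then v else (x.length : Int) + v) + 1)) none = pvRed v x := by
  have hv := h; unfold pvValid at hv
  have h0 : 0 ≤ (if 0 ≤ v then v else (x.length : Int) + v) := by split <;> omega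
  have h1 : (if 0 ≤ v then v else (x.length : Int) + v).toNat = pvN v x := rfl
  have h2 : ((if 0 ≤ v then v else (x.length : Int) + v) + 1).toNat = pvN v x + 1 := by
    unfold pvN; omega
  rw [PySem.List.slice_to x h0, PySem.List.slice_from x (by omega), h1, h2]
  rfl

-- length and validity are preserved by setting the resolved position to 1
theorem pvN_set1 {v : Int} {x : List Int} :
    pvN v (x.set (pvN v x) 1) = pvN v x := pvN_length_eq (by simp)

theorem getElem?_set1 {v : Int} {x : List Int} (h : pvValid v x) :
    (x.set (pvN v x) 1)[pvN v (x.set (pvN v x) 1)]? = some 1 := by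
  rw [pvN_set1]
  exact List.getElem?_set_self (pvN_lt h)

theorem pvRed_set1 {v : Int} {x : List Int} (h : pvValid v x) :
    pvRed v (x.set (pvN v x) 1) = pvRed v x := by
  unfold pvRed
  rw [pvN_set1, List.take_set_of_le (le_refl _), List.drop_set_of_lt (by omega)]

-- the reconstruction: a valid key with bit 1 at the resolved position and the same reduced key
-- IS x with that position set to 1
theorem pvKey_eq {v : Int} {x y : List Int} (hx : pvValid v x) (hy : pvValid v y)
    (hy1 : y[pvN v y]? = some 1) (hred : pvRed v y = pvRed v x) : y = x.set (pvN v x) 1 := by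
  have hly : pvN v y < y.length := pvN_lt hy
  have hlx : pvN v x < x.length := pvN_lt hx
  have hlen : y.length = x.length := by
    have := congrArg List.length hred
    simp only [pvRed, List.length_append, List.length_take, List.length_drop] at this
    omega
  have hn : pvN v y = pvN v x := pvN_length_eq hlen
  unfold pvRed at hred
  rw [hn] at hred hy1 hly
  have htake : y.take (pvN v x) = x.take (pvN v x) := by
    have h1 : (y.take (pvN v x)).length = (x.take (pvN v x)).length := by
      simp; omega
    exact (List.append_inj hred h1).1
  have hdrop : y.drop (pvN v x + 1) = x.drop (pvN v x + 1) := by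
    have h1 : (y.take (pvN v x)).length = (x.take (pvN v x)).length := by
      simp; omega
    exact (List.append_inj hred h1).2
  have hyel : y[pvN v x]'(by omega) = 1 := by
    rw [List.getElem?_eq_getElem (by omega)] at hy1
    simpa using hy1
  have hsplit : ∀ (z : List Int) (hz : pvN v x < z.length),
      z = z.take (pvN v x) ++ z[pvN v x]'hz :: z.drop (pvN v x + 1) := by
    intro z hz
    conv_lhs => rw [← List.take_append_drop (pvN v x) z]
    rw [List.drop_eq_getElem_cons hz]
  have hxs : pvN v x < (x.set (pvN v x) 1).length := by simpa using hlx
  rw [hsplit y (by omega), hsplit (x.set (pvN v x) 1) hxs, htake, hdrop,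
      List.take_set_of_le (le_refl _), List.drop_set_of_lt (by omega),
      List.getElem_set_self hxs, hyel]

-- a non-"bit 1" entry cannot be the set-to-1 neighbour
theorem ne_set1_of_not_is1 {v : Int} {x : List Int} {p : List Int × Int}
    (hp : pvValid v p.1) (hx : pvValid v x) (h : pvIs1 v p = false) :
    (p.1 == x.set (pvN v x) 1) = false := by
  apply beq_eq_false_iff_ne.2
  intro hcontra
  have h1' : PySem.List.pyGet? p.1 v = some 1 := by
    rw [pyGet?_pvN hp, hcontra]
    exact getElem?_set1 hx
  simp [pvIs1, h1'] at h

-- the CORE correspondence: looking the set-to-1 neighbour up in the full table equals looking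
-- the reduced key up in the (reduced-key, value) list of the bit-1 entries
theorem lookup_core {v : Int} {full : List (List Int × Int)}
    (hval : ∀ p ∈ full, pvValid v p.1) {x : List Int} (hx : pvValid v x) :
    (PySem.Dict.mk full).getD (x.set (pvN v x) 1) 0
      = (PySem.Dict.mk ((full.filter (pvIs1 v)).map (pvKV v))).getD (pvRed v x) 0 := by
  induction full with
  | nil => rfl
  | cons p rest ih =>
    have hp := hval p (by simp)
    have hrest : ∀ q ∈ rest, pvValid v q.1 := fun q hq => hval q (by simp [hq])
    by_cases h1 : pvIs1 v p = true
    · by_cases heq : p.1 = x.set (pvN v x) 1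
      · have hredp : pvRed v p.1 = pvRed v x := by rw [heq]; exact pvRed_set1 hx
        simp only [List.filter_cons, h1, if_true, List.map_cons, pvKV,
          PySem.Dict.getD, PySem.Dict.get?, List.find?]
        rw [show (p.1 == x.set (pvN v x) 1) = true from beq_iff_eq.2 heq,
            show (pvRed v p.1 == pvRed v x) = true from beq_iff_eq.2 hredp]
        rfl
      · have hredp : (pvRed v p.1 == pvRed v x) = false := by
          apply beq_eq_false_iff_ne.2
          intro hcontra
          exact heq (pvKey_eq hx hp (by
            have := h1; unfold pvIs1 at this
            rw [pyGet?_pvN hp] at this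
            exact beq_iff_eq.1 this) hcontra)
        simp only [List.filter_cons, h1, if_true, List.map_cons, pvKV,
          PySem.Dict.getD, PySem.Dict.get?, List.find?]
        rw [show (p.1 == x.set (pvN v x) 1) = false from beq_eq_false_iff_ne.2 heq, hredp]
        exact ih hrest
    · have hne := ne_set1_of_not_is1 hp hx (by simpa using h1)
      simp only [List.filter_cons, h1,
        PySem.Dict.getD, PySem.Dict.get?, List.find?, hne]
      exact ih hrest

-- A's loop is an `all` over the table
theorem goA_eq_all (full : List (List Int × Int)) (v : Int) (l : List (List Int × Int))
    (hval : ∀ p ∈ l, pvValid v p.1) :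
    is_monotone_negative_go full v l
      = l.all (fun p => !(pvIs0 v p)
          || !decide (p.2 < (PySem.Dict.mk full).getD (p.1.set (pvN v p.1) 1) 0)) := by
  induction l with
  | nil => rfl
  | cons p rest ih =>
    have hp := hval p (by simp)
    have hrest : ∀ q ∈ rest, pvValid v q.1 := fun q hq => hval q (by simp [hq])
    obtain ⟨bits, val⟩ := p
    have hg := pyGet?_pvN_some (v := v) (x := bits) hp
    by_cases h0 : bits[pvN v bits]'(pvN_lt hp) = 0
    · have his0 : pvIs0 v (bits, val) = true := by simp [pvIs0, hg, h0]
      simp only [is_monotone_negative_go, hg, h0, List.all_cons, his0,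
        pySetD_pvN hp, Bool.not_true, Bool.false_or, beq_self_eq_true, if_true]
      by_cases hlt : val < (PySem.Dict.mk full).getD (bits.set (pvN v bits) 1) 0
      · rw [if_pos hlt]; simp [hlt]
      · rw [if_neg hlt, ih hrest]; simp [hlt]
    · have his0 : pvIs0 v (bits, val) = false := by simp [pvIs0, hg, h0]
      simp only [is_monotone_negative_go, hg, List.all_cons, his0, Bool.not_false, Bool.true_or]
      rw [if_neg (by simpa using h0)]
      exact ih hrest

-- one iteration of B's grouping loop, on a valid entry
theorem altStep_eq (v : Int) (acc : List (List Int × Int) × PySem.Dict (List Int) Int)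
    (p : List Int × Int) (hp : pvValid v p.1) :
    is_monotone_negative_alt_step v acc p
      = if pvIs0 v p then (acc.1 ++ [pvKV v p], acc.2)
        else if pvIs1 v p then (acc.1, acc.2.insert (pvRed v p.1) p.2) else acc := by
  have hg := pyGet?_pvN_some (v := v) (x := p.1) hp
  simp only [is_monotone_negative_alt_step, pvIs0, pvIs1, hg, pvKV]
  rw [slice_pvRed hp]
  by_cases h0 : p.1[pvN v p.1]'(pvN_lt hp) = 0 <;>
    by_cases h1 : p.1[pvN v p.1]'(pvN_lt hp) = 1 <;>
      simp [h0, h1]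

-- B's loop splits into the zeros list and the ones index
theorem foldB_eq (v : Int) (l : List (List Int × Int))
    (z : List (List Int × Int)) (d : PySem.Dict (List Int) Int)
    (hval : ∀ p ∈ l, pvValid v p.1) :
    l.foldl (is_monotone_negative_alt_step v) (z, d)
      = (z ++ (l.filter (pvIs0 v)).map (pvKV v),
         (l.filter (pvIs1 v)).foldl (fun d p => d.insert (pvRed v p.1) p.2) d) := by
  induction l generalizing z d with
  | nil => simp
  | cons p rest ih =>
    have hp := hval p (by simp)
    have hrest : ∀ q ∈ rest, pvValid v q.1 := fun q hq => hval q (by simp [hq])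
    simp only [List.foldl_cons, altStep_eq v (z, d) p hp, List.filter_cons]
    by_cases h0 : pvIs0 v p = true
    · have h1 : pvIs1 v p = false := by
        unfold pvIs0 at h0; unfold pvIs1
        rcases beq_iff_eq.1 h0 with h
        simp [h]
      simp only [h0, h1, if_true, if_false, Bool.false_eq_true, ih _ _ hrest, List.map_cons]
      simp
    · by_cases h1 : pvIs1 v p = true
      · simp only [h0, h1, if_true, Bool.false_eq_true, if_false, ih _ _ hrest, List.foldl_cons]
      · simp only [h0, h1, Bool.false_eq_true, if_false, ih _ _ hrest]

-- injectivity of the reduced key on bit-1 entries (used to show the insert loop only ever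
-- inserts fresh keys, so it builds exactly the (reduced-key, value) list)
theorem ones_fold_items {v : Int} {full : List (List Int × Int)}
    (hval : ∀ p ∈ full, pvValid v p.1) (hnd : (full.map Prod.fst).Nodup) :
    ((full.filter (pvIs1 v)).foldl (fun d p => d.insert (pvRed v p.1) p.2) PySem.Dict.empty)
      = PySem.Dict.mk ((full.filter (pvIs1 v)).map (pvKV v)) := by
  apply PySem.Dict.ext
  have hsub : (full.filter (pvIs1 v)).Sublist full := List.filter_sublist
  have hinj : ∀ p ∈ full.filter (pvIs1 v), ∀ q ∈ full.filter (pvIs1 v),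
      pvRed v p.1 = pvRed v q.1 → p = q := by
    intro p hpm q hqm hred
    have hpf := List.mem_filter.1 hpm
    have hqf := List.mem_filter.1 hqm
    have hp := hval p hpf.1
    have hq := hval q hqf.1
    have hp1 : p.1[pvN v p.1]? = some 1 := by
      have := hpf.2; unfold pvIs1 at this
      rw [pyGet?_pvN hp] at this; exact beq_iff_eq.1 this
    have hq1 : q.1[pvN v q.1]? = some 1 := by
      have := hqf.2; unfold pvIs1 at this
      rw [pyGet?_pvN hq] at this; exact beq_iff_eq.1 this
    have hkey : p.1 = q.1 := by
      have e1 : p.1 = q.1.set (pvN v q.1) 1 := pvKey_eq hq hp hp1 hred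
      have e2 : q.1 = q.1.set (pvN v q.1) 1 := pvKey_eq hq hq hq1 rfl
      exact e1.trans e2.symm
    exact List.inj_on_of_nodup_map ((hsub.map Prod.fst).nodup hnd) hpm hqm hkey
  have hknd : ((full.filter (pvIs1 v)).map (fun p => pvRed v p.1)).Nodup := by
    apply List.Nodup.map_on
    · intro p hpm q hqm h; exact hinj p hpm q hqm h
    · exact (List.Nodup.of_map Prod.fst hnd).sublist hsub
  rw [PySem.Dict.items_foldl_insert_fresh (full.filter (pvIs1 v))
      (fun p => pvRed v p.1) (fun p => p.2) PySem.Dict.empty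
      (fun a _ => PySem.Dict.contains_empty _) hknd]
  rfl

theorem all_congr_mem' {α : Type} {l : List α} {f g : α → Bool}
    (h : ∀ x ∈ l, f x = g x) : l.all f = l.all g := by
  induction l with
  | nil => rfl
  | cons x xs ih =>
    simp only [List.all_cons, h x (by simp), ih (fun y hy => h y (by simp [hy]))]

-- ===== VERDICT (by name: the statement is the Claim_ definition above) =====
theorem is_monotone_negative_spec : Claim_equal_is_monotone_negative := by
  intro tt v _ hpre
  obtain ⟨-, hnd, hvalid⟩ := hpre
  have hval : ∀ p ∈ tt, pvValid v p.1 := fun p hp => hvalid p hp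
  unfold Spec_is_monotone_negative is_monotone_negative is_monotone_negative_alt
  rw [goA_eq_all tt v tt hval, foldB_eq v tt [] PySem.Dict.empty hval]
  dsimp only
  simp only [List.nil_append]
  rw [ones_fold_items hval hnd, List.all_map]
  rw [← List.all_filter]
  apply all_congr_mem'
  intro p hp
  have hvp := hval p (List.mem_filter.1 hp).1
  simp only [Function.comp, pvKV]
  simp only [← lookup_core hval hvp]
  simp [not_lt, ← decide_not]
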